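-- pv_equiv track=rewrite | github.com/Congr00/Uni | Artificial Intelligence/lab3/zad2/logic_solver_backtrack.py | and_product
-- ===== SOURCE A (Python) =====
-- def and_product(states):
--
--     #ln = next(states, [])
--     ln = next(iter(states), [])
--     if len(ln) == 0: return []
--     res = list(map(lambda x: -1 if x == 0 else x, ln))
--     for state in states:
--         for k in range(0, len(res)):
--             if state[k] == 1 and res[k] == 1: res[k] = 1
--             elif state[k] == 0 and res[k] == -1: res[k] = -1
--             else: res[k] = 0
--     return res
-- ===== SOURCE B (Python) =====
-- def and_product(states):
--     ln = next(iter(states), [])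
--     if len(ln) == 0:
--         return []
--     out = []
--     for k in range(len(ln)):
--         col = [s[k] for s in states]
--         if all(v == 1 for v in col):
--             out.append(1)
--         elif all(v == 0 for v in col):
--             out.append(-1)
--         else:
--             out.append(0)
--     return out
-- ===== Notes on version B (the rewrite author's own statement) =====
-- stated objective: simpler
-- what changed: B replaces A's row-major in-place accumulator (seed row transformed, then destructive per-row updates) with a column-wise pass that decides each output entry directly from the whole column via two all() tests.
import Mathlib
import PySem

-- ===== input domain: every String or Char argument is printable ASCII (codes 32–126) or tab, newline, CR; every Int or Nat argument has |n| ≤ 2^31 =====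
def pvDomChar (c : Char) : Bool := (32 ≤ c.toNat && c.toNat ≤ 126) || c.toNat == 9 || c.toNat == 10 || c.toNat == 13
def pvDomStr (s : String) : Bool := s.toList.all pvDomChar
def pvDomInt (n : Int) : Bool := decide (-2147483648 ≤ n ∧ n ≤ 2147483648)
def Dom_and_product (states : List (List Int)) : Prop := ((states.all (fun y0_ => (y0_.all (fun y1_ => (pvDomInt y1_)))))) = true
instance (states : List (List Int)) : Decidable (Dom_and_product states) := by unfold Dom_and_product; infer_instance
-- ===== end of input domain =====

-- B replaces A's row-major in-place accumulator with a column-wise pass deciding each entry by two all() tests (objective: simpler).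

-- ===== PORT A =====
def and_product (states : List (List Int)) : List Int :=
  -- ln = next(iter(states), [])
  let ln := states.headD []
  if ln.length = 0 then []
  else
    -- res = list(map(lambda x: -1 if x == 0 else x, ln))
    let res := ln.map (fun x => if x = 0 then (-1 : Int) else x)
    -- for state in states: for k in range(0, len(res)): ...
    states.foldl (fun res state =>
      (List.range res.length).foldl (fun (res : List Int) (k : ℕ) =>
        -- state[k], res[k]: pyGetD is exact under Pre_ (k < len state, k < len res)
        let sk := PySem.List.pyGetD state (k : Int) 0
        let rk := PySem.List.pyGetD res (k : Int) 0
        if sk = 1 ∧ rk = 1 then res.set k 1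
        else if sk = 0 ∧ rk = -1 then res.set k (-1)
        else res.set k 0) res) res

-- ===== PORT B =====
def and_product_alt (states : List (List Int)) : List Int :=
  let ln := states.headD []
  if ln.length = 0 then []
  else
    (List.range ln.length).foldl (fun (out : List Int) (k : ℕ) =>
      let col := states.map (fun s => PySem.List.pyGetD s (k : Int) 0)
      if col.all (fun v => v == 1) then out ++ [(1 : Int)]
      else if col.all (fun v => v == 0) then out ++ [(-1 : Int)]
      else out ++ [(0 : Int)]) []

-- ===== PRECONDITION & SPEC =====
-- Pre_ excludes exactly the inputs on which Python A raises IndexError: some row shorter than the first row.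
def Pre_and_product (states : List (List Int)) : Prop :=
  ∀ s ∈ states, (states.headD []).length ≤ s.length
instance (states : List (List Int)) : Decidable (Pre_and_product states) := by unfold Pre_and_product; infer_instance
def pvWitness_and_product : List (List Int) := [[1, 0, 2], [1, 1, 0]]

def Spec_and_product (states : List (List Int)) (out : List Int) : Prop := out = and_product_alt states
instance (states : List (List Int)) (out : List Int) : Decidable (Spec_and_product states out) := by unfold Spec_and_product; infer_instance

-- ===== CLAIM (what is proved, stated in full; the proofs are below) =====
def Claim_equal_and_product : Prop := ∀ (states : List (List Int)), Dom_and_product states → Pre_and_product states → Spec_and_product states (and_product states)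

-- ===== LEMMAS AND PROOFS =====

-- the per-cell combining function of A's inner loop
def gstep (sk rk : Int) : Int :=
  if sk = 1 ∧ rk = 1 then 1 else if sk = 0 ∧ rk = -1 then -1 else 0

theorem step_eq_set_gstep (r state : List Int) (k : ℕ) :
    (let sk := PySem.List.pyGetD state (k : Int) 0
     let rk := PySem.List.pyGetD r (k : Int) 0
     if sk = 1 ∧ rk = 1 then r.set k 1
     else if sk = 0 ∧ rk = -1 then r.set k (-1)
     else r.set k 0)
    = r.set k (gstep (state.getD k 0) (r.getD k 0)) := by
  simp only [PySem.List.pyGetD_natCast, gstep]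
  split_ifs <;> rfl

theorem set_fold_len (F : ℕ → Int → Int) :
    ∀ (l : List ℕ) (res : List Int),
      (l.foldl (fun r k => r.set k (F k (r.getD k 0))) res).length = res.length := by
  intro l
  induction l with
  | nil => intro res; rfl
  | cons k l ih => intro res; simpa using ih (res.set k (F k (res.getD k 0)))

theorem set_fold_getD (F : ℕ → Int → Int) :
    ∀ (n i : ℕ) (res : List Int) (j : ℕ),
      ((List.range' i n).foldl (fun r k => r.set k (F k (r.getD k 0))) res).getD j 0
      = if i ≤ j ∧ j < i + n ∧ j < res.length then F j (res.getD j 0) else res.getD j 0 := by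
  intro n
  induction n with
  | zero => intro i res j; simp; omega
  | succ n ih =>
    intro i res j
    rw [List.range'_succ, List.foldl_cons, ih]
    have hlen : (res.set i (F i (res.getD i 0))).length = res.length := by simp
    have hget : ∀ m : ℕ, (res.set i (F i (res.getD i 0))).getD m 0
        = if m = i ∧ i < res.length then F i (res.getD i 0) else res.getD m 0 := by
      intro m
      by_cases hmi : i = m
      · subst hmi
        by_cases hil : i < res.length
        · simp [List.getD, hil]
        · simp [List.getD, hil]
      · simp [List.getD, hmi, Ne.symm hmi]
    rw [hlen]
    by_cases h1 : i + 1 ≤ j ∧ j < i + 1 + n ∧ j < res.length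
    · rw [if_pos h1, hget, if_neg (by omega), if_pos (by omega)]
    · rw [if_neg h1, hget]
      by_cases h2 : i ≤ j ∧ j < i + (n + 1) ∧ j < res.length
      · rw [if_pos h2, if_pos (by omega)]
        have : j = i := by omega
        rw [this]
      · rw [if_neg h2, if_neg (by omega)]

theorem inner_congr (state res : List Int) :
    ((List.range res.length).foldl (fun (r : List Int) (k : ℕ) =>
        let sk := PySem.List.pyGetD state (k : Int) 0
        let rk := PySem.List.pyGetD r (k : Int) 0
        if sk = 1 ∧ rk = 1 then r.set k 1
        else if sk = 0 ∧ rk = -1 then r.set k (-1)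
        else r.set k 0) res)
    = (List.range res.length).foldl
        (fun r k => r.set k ((fun k rk => gstep (state.getD k 0) rk) k (r.getD k 0))) res := by
  apply List.foldl_ext
  intro r k _
  exact step_eq_set_gstep r state k

-- A's inner loop, pointwise
theorem inner_getD (state res : List Int) (j : ℕ) (hj : j < res.length) :
    ((List.range res.length).foldl (fun (r : List Int) (k : ℕ) =>
        let sk := PySem.List.pyGetD state (k : Int) 0
        let rk := PySem.List.pyGetD r (k : Int) 0
        if sk = 1 ∧ rk = 1 then r.set k 1
        else if sk = 0 ∧ rk = -1 then r.set k (-1)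
        else r.set k 0) res).getD j 0
    = gstep (state.getD j 0) (res.getD j 0) := by
  rw [inner_congr, List.range_eq_range', set_fold_getD]
  simp [hj]

theorem inner_len (state res : List Int) :
    ((List.range res.length).foldl (fun (r : List Int) (k : ℕ) =>
        let sk := PySem.List.pyGetD state (k : Int) 0
        let rk := PySem.List.pyGetD r (k : Int) 0
        if sk = 1 ∧ rk = 1 then r.set k 1
        else if sk = 0 ∧ rk = -1 then r.set k (-1)
        else r.set k 0) res).length = res.length := by
  rw [inner_congr]; exact set_fold_len _ _ res

-- A's outer loop, pointwise: each column is folded independently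
theorem outer_len :
    ∀ (states : List (List Int)) (res : List Int),
      (states.foldl (fun res state =>
        (List.range res.length).foldl (fun (r : List Int) (k : ℕ) =>
          let sk := PySem.List.pyGetD state (k : Int) 0
          let rk := PySem.List.pyGetD r (k : Int) 0
          if sk = 1 ∧ rk = 1 then r.set k 1
          else if sk = 0 ∧ rk = -1 then r.set k (-1)
          else r.set k 0) res) res).length = res.length := by
  intro states
  induction states with
  | nil => intro res; rfl
  | cons s ss ih =>
    intro res
    rw [List.foldl_cons, ih, inner_len]

theorem outer_getD :
    ∀ (states : List (List Int)) (res : List Int) (j : ℕ), j < res.length →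
      (states.foldl (fun res state =>
        (List.range res.length).foldl (fun (r : List Int) (k : ℕ) =>
          let sk := PySem.List.pyGetD state (k : Int) 0
          let rk := PySem.List.pyGetD r (k : Int) 0
          if sk = 1 ∧ rk = 1 then r.set k 1
          else if sk = 0 ∧ rk = -1 then r.set k (-1)
          else r.set k 0) res) res).getD j 0
      = states.foldl (fun a s => gstep (s.getD j 0) a) (res.getD j 0) := by
  intro states
  induction states with
  | nil => intro res j hj; rfl
  | cons s ss ih =>
    intro res j hj
    rw [List.foldl_cons, List.foldl_cons,
      ih _ j (by rw [inner_len]; exact hj), inner_getD _ _ _ hj]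

-- the column fold characterised by two "all" tests
theorem foldg_all :
    ∀ (vs : List Int) (a : Int), (a = 1 ∨ a = -1 ∨ a = 0) →
      vs.foldl (fun a v => gstep v a) a
      = if a = 1 ∧ vs.all (fun v => v == 1) then 1
        else if a = -1 ∧ vs.all (fun v => v == 0) then -1 else 0 := by
  intro vs
  induction vs with
  | nil =>
    intro a ha
    rcases ha with h | h | h <;> subst h <;> simp
  | cons v vs ih =>
    intro a ha
    rw [List.foldl_cons, ih (gstep v a) (by unfold gstep; split_ifs <;> simp)]
    unfold gstep
    rcases ha with h | h | h <;> subst h <;>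
      by_cases hv1 : v = 1 <;> by_cases hv0 : v = 0 <;>
        simp [hv1, hv0]

theorem b_fold_eq_map (states : List (List Int)) (n : ℕ) :
    ((List.range n).foldl (fun (out : List Int) (k : ℕ) =>
      let col := states.map (fun s => PySem.List.pyGetD s (k : Int) 0)
      if col.all (fun v => v == 1) then out ++ [(1 : Int)]
      else if col.all (fun v => v == 0) then out ++ [(-1 : Int)]
      else out ++ [(0 : Int)]) [])
    = (List.range n).map (fun (k : ℕ) =>
      let col := states.map (fun s => PySem.List.pyGetD s (k : Int) 0)
      if col.all (fun v => v == 1) then (1 : Int)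
      else if col.all (fun v => v == 0) then (-1 : Int)
      else (0 : Int)) := by
  have h : ∀ (l : List ℕ) (acc : List Int),
      (l.foldl (fun (out : List Int) (k : ℕ) =>
        let col := states.map (fun s => PySem.List.pyGetD s (k : Int) 0)
        if col.all (fun v => v == 1) then out ++ [(1 : Int)]
        else if col.all (fun v => v == 0) then out ++ [(-1 : Int)]
        else out ++ [(0 : Int)]) acc)
      = acc ++ l.map (fun (k : ℕ) =>
        let col := states.map (fun s => PySem.List.pyGetD s (k : Int) 0)
        if col.all (fun v => v == 1) then (1 : Int)
        else if col.all (fun v => v == 0) then (-1 : Int)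
        else (0 : Int)) := by
    intro l
    induction l with
    | nil => intro acc; simp
    | cons k l ih =>
      intro acc
      rw [List.foldl_cons, ih, List.map_cons]
      dsimp only
      split_ifs <;> simp
  simpa using h (List.range n) []

-- ===== VERDICT (by name: the statement is the Claim_ definition above) =====
theorem and_product_spec : Claim_equal_and_product := by
  intro states _hdom hpre
  unfold Spec_and_product and_product and_product_alt
  cases states with
  | nil => rfl
  | cons ln rest =>
    simp only [List.headD_cons]
    by_cases hln : ln.length = 0
    · rw [if_pos hln, if_pos hln]
    · rw [if_neg hln, if_neg hln]
      rw [b_fold_eq_map]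
      have hlen0 : (ln.map (fun x => if x = 0 then (-1 : Int) else x)).length = ln.length := by simp
      apply List.ext_getElem
      · rw [outer_len, hlen0]; simp
      · intro j h1 h2
        have hj : j < ln.length := by
          rw [outer_len, hlen0] at h1; exact h1
        rw [← List.getD_eq_getElem _ 0 h1, ← List.getD_eq_getElem _ 0 h2]
        rw [outer_getD _ _ j (by rw [hlen0]; exact hj)]
        -- seed value at column j
        have hseed : (ln.map (fun x => if x = 0 then (-1 : Int) else x)).getD j 0
            = (if ln[j] = 0 then (-1 : Int) else ln[j]) := by
          rw [List.getD_eq_getElem _ 0 (by rw [hlen0]; exact hj)]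
          simp
        rw [hseed]
        -- first fold step: the first row combined with its own seed
        have hfirst : gstep (ln.getD j 0) (if ln[j] = 0 then (-1 : Int) else ln[j])
            = if ln[j] = 1 then 1 else if ln[j] = 0 then -1 else 0 := by
          rw [List.getD_eq_getElem _ 0 hj]
          unfold gstep
          by_cases ha : ln[j] = 1 <;> by_cases hb : ln[j] = 0 <;> simp [ha, hb]
        rw [List.foldl_cons, hfirst]
        have hrest := foldg_all (rest.map (fun s => s.getD j 0))
          (if ln[j] = 1 then 1 else if ln[j] = 0 then -1 else 0)
          (by split_ifs <;> simp)
        rw [List.foldl_map] at hrest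
        rw [hrest]
        -- right-hand side: split the column at its first element
        rw [List.getD_eq_getElem _ 0 (by simpa using hj)]
        simp only [List.getElem_map, List.getElem_range, List.map_cons, List.all_cons,
          PySem.List.pyGetD_natCast]
        have hlnj : ln.getD j 0 = ln[j] := List.getD_eq_getElem _ 0 hj
        rw [hlnj]
        by_cases ha : ln[j] = 1 <;> by_cases hb : ln[j] = 0 <;>
          simp [ha, hb]
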